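-- pv_equiv track=rewrite | github.com/Dixie234/Algorithms | LeetCode Interview Questions/Daily Questions/1769. minimum_moves_of_balls_to_boxes.py | minOperations
-- ===== SOURCE A (Python) =====
-- from typing import List
--
-- def minOperations(boxes: str) -> List[int]:
--     boxes_set = set([i for i, box in enumerate(boxes) if box == "1"])
--     result = []
--     for i in range(len(boxes)):
--         total_moves = 0
--         for box_index in boxes_set:
--             total_moves += abs(i - box_index)
--         result.append(total_moves)
--     return result
-- ===== SOURCE B (Python) =====
-- from typing import List
--
-- def minOperations(boxes: str) -> List[int]:
--     # Two-pass prefix accumulation: the left pass tracks ball count and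
--     # cumulative moves from the left, the right pass (on the reversed
--     # string) from the right; the answer is their elementwise sum.
--     def scan(cs):
--         out = []
--         cnt = 0
--         moves = 0
--         for c in cs:
--             out.append(moves)
--             if c == "1":
--                 cnt += 1
--             moves += cnt
--         return out
--     left = scan(boxes)
--     right = scan(boxes[::-1])[::-1]
--     return [a + b for a, b in zip(left, right)]
-- ===== Notes on version B (the rewrite author's own statement) =====
-- stated objective: alternative
-- what changed: Replaced the per-box scan over the whole ball set with two prefix-accumulation passes tracking ball count and cumulative moves, combined by elementwise addition.
import Mathlib
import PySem

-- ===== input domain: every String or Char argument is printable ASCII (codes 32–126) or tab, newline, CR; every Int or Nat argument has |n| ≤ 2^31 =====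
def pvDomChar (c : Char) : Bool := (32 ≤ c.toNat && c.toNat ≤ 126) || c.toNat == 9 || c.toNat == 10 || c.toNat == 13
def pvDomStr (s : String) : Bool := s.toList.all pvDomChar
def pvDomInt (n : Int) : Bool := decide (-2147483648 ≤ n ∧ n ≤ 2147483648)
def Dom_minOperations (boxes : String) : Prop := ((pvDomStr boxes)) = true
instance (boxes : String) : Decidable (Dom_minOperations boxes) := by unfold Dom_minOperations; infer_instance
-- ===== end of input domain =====

-- B replaces A's per-box scan over the whole ball set with two
-- prefix-accumulation passes (ball count + cumulative moves), added elementwise.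

-- ===== PORT A =====
-- set([i for i, box in enumerate(boxes) if box == "1"]); then for each i in
-- range(len(boxes)) sum abs(i - box_index) over the set (sum is order-independent).
def minOperations (boxes : String) : List Int :=
  let boxes_set : PySem.Set Int :=
    PySem.Set.ofList ((PySem.List.enumerate boxes.toList 0).filterMap
      (fun p => if p.2 = '1' then some p.1 else none))
  (PySem.List.pyRange 0 (boxes.toList.length : Int) 1).foldl
    (fun result i =>
      result ++ [boxes_set.foldl (fun total_moves j => total_moves + |i - j|) 0])
    []

-- ===== PORT B =====
-- the 'scan' helper of Source B: one forward pass, state (out, cnt, moves)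
def scanOnes (cs : List Char) : List Int :=
  (cs.foldl
    (fun (st : List Int × Int × Int) c =>
      let cnt := st.2.1 + (if c = '1' then 1 else 0)
      (st.1 ++ [st.2.2], cnt, st.2.2 + cnt))
    ([], 0, 0)).1

def minOperations_alt (boxes : String) : List Int :=
  let l := boxes.toList
  List.zipWith (· + ·) (scanOnes l) ((scanOnes l.reverse).reverse)

-- ===== PRECONDITION & SPEC =====
def Spec_minOperations (boxes : String) (out : List Int) : Prop := out = minOperations_alt boxes
instance (boxes : String) (out : List Int) : Decidable (Spec_minOperations boxes out) := by unfold Spec_minOperations; infer_instance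

-- ===== CLAIM (what is proved, stated in full; the proofs are below) =====
def Claim_equal_minOperations : Prop := ∀ (boxes : String), Dom_minOperations boxes → Spec_minOperations boxes (minOperations boxes)

-- ===== LEMMAS AND PROOFS =====

-- positions of '1' in cs, numbered from k
def posF : List Char → Int → List Int
  | [], _ => []
  | c :: cs, k => (if c = '1' then [k] else []) ++ posF cs (k + 1)

-- left-moves formula: sum over ones j < i of (i - j), by recursion
def gOnes : List Char → Nat → Int
  | _, 0 => 0
  | [], _ + 1 => 0
  | c :: cs, i + 1 => (if c = '1' then ((i : Int) + 1) else 0) + gOnes cs i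

theorem posF_eq_filterMap (cs : List Char) (k : Int) :
    (PySem.List.enumerate cs k).filterMap (fun p => if p.2 = '1' then some p.1 else none)
      = posF cs k := by
  induction cs generalizing k with
  | nil => simp [posF, PySem.List.enumerate_nil]
  | cons c cs ih =>
    simp only [PySem.List.enumerate_cons, List.filterMap_cons, posF]
    by_cases h : c = '1' <;> simp [h, ih]

theorem mem_posF {cs : List Char} {k j : Int} (h : j ∈ posF cs k) : k ≤ j := by
  induction cs generalizing k with
  | nil => simp [posF] at h
  | cons c cs ih =>
    simp only [posF, List.mem_append] at h
    rcases h with h | h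
    · split at h <;> simp_all
    · have := ih h; omega

theorem nodup_posF (cs : List Char) (k : Int) : (posF cs k).Nodup := by
  induction cs generalizing k with
  | nil => simp [posF]
  | cons c cs ih =>
    simp only [posF]
    split
    · simp only [List.singleton_append, List.nodup_cons]
      exact ⟨fun h => by have := mem_posF h; omega, ih (k + 1)⟩
    · simpa using ih (k + 1)

theorem posF_shift (cs : List Char) (k d : Int) :
    posF cs (k + d) = (posF cs k).map (· + d) := by
  induction cs generalizing k with
  | nil => simp [posF]
  | cons c cs ih =>
    simp only [posF, List.map_append]
    have : k + d + 1 = (k + 1) + d := by omega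
    rw [this, ih]
    split <;> simp

theorem posF_append (xs ys : List Char) (k : Int) :
    posF (xs ++ ys) k = posF xs k ++ posF ys (k + xs.length) := by
  induction xs generalizing k with
  | nil => simp [posF]
  | cons x xs ih =>
    simp only [List.cons_append, posF, ih]
    simp only [List.length_cons]
    have : k + 1 + (xs.length : Int) = k + ((xs.length : Int) + 1) := by omega
    rw [this]
    simp [List.append_assoc]

-- gOnes cs i = Σ_{j ∈ posF cs 0} max(i - j, 0)
theorem gOnes_eq_sum (cs : List Char) (i : Nat) :
    gOnes cs i = ((posF cs 0).map (fun j => max ((i : Int) - j) 0)).sum := by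
  induction cs generalizing i with
  | nil => cases i <;> simp [gOnes, posF]
  | cons c cs ih =>
    cases i with
    | zero =>
      show (0 : Int) = _
      symm
      apply List.sum_eq_zero
      intro x hx
      simp only [List.mem_map] at hx
      obtain ⟨j, hj, rfl⟩ := hx
      have := mem_posF hj
      omega
    | succ i =>
      simp only [gOnes, posF, List.map_append, List.sum_append]
      have h1 : posF cs (0 + 1) = (posF cs 0).map (· + 1) := posF_shift cs 0 1
      have h2 : ((posF cs (0 + 1)).map (fun j => max (((i + 1 : Nat) : Int) - j) 0)).sum
          = ((posF cs 0).map (fun j => max ((i : Int) - j) 0)).sum := by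
        rw [h1, List.map_map]
        congr 1
        apply List.map_congr_left
        intro j _
        simp only [Function.comp]
        congr 1
        push_cast
        ring
      rw [h2, ← ih i]
      split <;> simp <;> omega

-- the scan loop computes exactly the gOnes values
theorem scan_foldl (cs : List Char) (acc : List Int) (cnt moves : Int) :
    (cs.foldl
      (fun (st : List Int × Int × Int) c =>
        let cnt := st.2.1 + (if c = '1' then 1 else 0)
        (st.1 ++ [st.2.2], cnt, st.2.2 + cnt))
      (acc, cnt, moves)).1
    = acc ++ (List.range cs.length).map
        (fun (i : Nat) => moves + (i : Int) * cnt + gOnes cs i) := by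
  induction cs generalizing acc cnt moves with
  | nil => simp
  | cons c cs ih =>
    simp only [List.foldl_cons]
    rw [ih]
    simp only [List.length_cons, List.range_succ_eq_map, List.map_cons, List.map_map,
      List.append_assoc, List.singleton_append]
    congr 1
    congr 1
    · simp [gOnes]
    · apply List.map_congr_left
      intro i _
      simp only [Function.comp, gOnes]
      push_cast
      split <;> ring

theorem scanOnes_eq (cs : List Char) :
    scanOnes cs = (List.range cs.length).map (fun i => gOnes cs i) := by
  unfold scanOnes
  rw [scan_foldl]
  simp

-- positions of the reversed list
theorem posF_reverse (cs : List Char) :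
    posF cs.reverse 0 = ((posF cs 0).map (fun j => (cs.length : Int) - 1 - j)).reverse := by
  induction cs with
  | nil => simp [posF]
  | cons c cs ih =>
    simp only [List.reverse_cons, posF_append, ih, posF, List.map_append,
      List.reverse_append, List.length_cons, List.length_reverse]
    have h1 : posF cs (0 + 1) = (posF cs 0).map (· + 1) := posF_shift cs 0 1
    rw [h1, List.map_map]
    congr 1
    · congr 1
      apply List.map_congr_left
      intro j _
      simp only [Function.comp]
      push_cast
      ring
    · split <;> simp [posF]

-- right-moves value: gOnes of the reversed list at n-1-i = Σ max(j - i, 0)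
theorem gOnes_reverse_eq_sum (cs : List Char) (i : Nat) (hi : i < cs.length) :
    gOnes cs.reverse (cs.length - 1 - i)
      = ((posF cs 0).map (fun j => max (j - (i : Int)) 0)).sum := by
  rw [gOnes_eq_sum, posF_reverse, ← List.map_reverse, List.map_map, List.map_reverse,
    List.sum_reverse]
  congr 1
  apply List.map_congr_left
  intro j _
  simp only [Function.comp]
  congr 1
  have : ((cs.length - 1 - i : Nat) : Int) = (cs.length : Int) - 1 - i := by omega
  rw [this]
  ring

theorem abs_split (a : Int) : |a| = max a 0 + max (-a) 0 := by
  rcases le_total a 0 with h | h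
  · rw [abs_of_nonpos h]; omega
  · rw [abs_of_nonneg h]; omega

theorem length_scanOnes (cs : List Char) : (scanOnes cs).length = cs.length := by
  rw [scanOnes_eq]; simp

-- ===== VERDICT (by name: the statement is the Claim_ definition above) =====
theorem minOperations_spec : Claim_equal_minOperations := by
  intro boxes _
  unfold Spec_minOperations minOperations minOperations_alt
  set cs := boxes.toList with hcs
  have hpos : (PySem.List.enumerate cs 0).filterMap
      (fun p => if p.2 = '1' then some p.1 else none) = posF cs 0 := posF_eq_filterMap cs 0
  have hset : PySem.Set.ofList (posF cs 0) = posF cs 0 :=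
    PySem.Set.ofList_eq_self_of_nodup _ (nodup_posF cs 0)
  simp only [hpos, hset]
  -- A side: foldl that appends is a map over the range
  rw [PySem.List.pyRange_zero_nat, PySem.List.foldl_append_singleton_eq_map, List.map_map]
  -- B side: scans are maps of gOnes
  apply List.ext_getElem
  · simp [length_scanOnes, scanOnes_eq]
  intro k h1 h2
  have hk : k < cs.length := by simpa using h1
  have hk' : cs.length - 1 - k < cs.reverse.length := by simp; omega
  rw [List.getElem_zipWith, List.getElem_reverse]
  simp only [List.nil_append, length_scanOnes, List.length_reverse]
  simp only [scanOnes_eq]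
  rw [List.getElem_map, List.getElem_map, List.getElem_map, List.getElem_range,
    List.getElem_range, Function.comp]
  rw [gOnes_eq_sum, gOnes_reverse_eq_sum cs k hk]
  -- foldl sum = sum of map, then combine the two sums pointwise
  rw [PySem.List.foldl_add]
  rw [show ((0 : Int) + ((posF cs 0).map fun j => |(k : Int) - j|).sum
        = ((posF cs 0).map fun j => |(k : Int) - j|).sum) from by ring]
  rw [← List.sum_map_add]
  congr 1
  apply List.map_congr_left
  intro j _
  rw [abs_split]
  congr 1
  omega
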